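-- pv_equiv track=rewrite | github.com/ioaksenenko/neural_networks | 2_untagging_submasks_maker/datamaker/type_3/main.py | text_input_question_generate
-- ===== SOURCE A (Python) =====
-- def text_input_question_generate(n=1, m=1):
--     inputs = []
--     outputs = []
--     input = '<p>T</p>'
--     output = ['___T____']
--     for _ in range(2 * n):
--         output.append('________')
--     for i in range(n):
--         input += '<p><u>T</u></p>' + '<p>T</p>'
--         output[0] += '_______________' + '________'
--         for j in range(n):
--             if j == i:
--                 output[2 * j + 1] += '___<u>T</u>____' + '________'
--                 output[2 * j + 2] += '_______________' + '___T____'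
--             else:
--                 output[2 * j + 1] += '_______________' + '________'
--                 output[2 * j + 2] += '_______________' + '________'
--     inputs.append(input)
--     outputs.append(output)
--     inputs.append(input[0:len(input)-8])
--     outputs.append([el[:len(el)-8] for el in output][:len(output)-1])
--     return inputs, outputs
-- ===== SOURCE B (Python) =====
-- def text_input_question_generate(n=1, m=1):
--     norm = '_______________' + '________'
--     input = '<p>T</p>' + ('<p><u>T</u></p>' + '<p>T</p>') * n
--     output = ['___T____' + norm * n]
--     for j in range(n):
--         output.append('________' + norm * j + '___<u>T</u>____' + '________' + norm * (n - 1 - j))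
--         output.append('________' + norm * j + '_______________' + '___T____' + norm * (n - 1 - j))
--     inputs = [input, input[:-8]]
--     outputs = [output, [el[:-8] for el in output][:-1]]
--     return inputs, outputs
-- ===== Notes on version B (the rewrite author's own statement) =====
-- stated objective: simpler
-- what changed: A fills a pre-allocated list of blank rows through nested i,j loops of in-place string edits keyed on j == i; B drops both loops' interaction and builds each row (and the input string) directly from its row index by string repetition.
import Mathlib
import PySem

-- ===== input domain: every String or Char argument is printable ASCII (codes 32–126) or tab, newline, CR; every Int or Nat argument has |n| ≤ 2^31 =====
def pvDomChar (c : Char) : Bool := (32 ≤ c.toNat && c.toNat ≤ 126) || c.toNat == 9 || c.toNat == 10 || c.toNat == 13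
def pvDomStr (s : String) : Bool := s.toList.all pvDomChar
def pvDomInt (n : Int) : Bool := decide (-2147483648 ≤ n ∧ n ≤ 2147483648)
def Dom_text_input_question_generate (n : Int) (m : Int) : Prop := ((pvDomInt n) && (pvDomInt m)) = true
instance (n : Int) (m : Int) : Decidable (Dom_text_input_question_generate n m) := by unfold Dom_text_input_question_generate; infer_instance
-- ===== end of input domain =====

-- B builds each output row directly from its row index instead of A's nested i,j loops of in-place edits; objective: simpler.

-- ===== PORT A =====
-- inner loop body of A: the j-loop editing rows 2j+1 and 2j+2 in place
def aInner (i : Int) (out : List String) (j : Int) : List String :=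
  if j == i then
    PySem.List.pySetD
      (PySem.List.pySetD out (2*j+1) (PySem.List.pyGetD out (2*j+1) "" ++ ("___<u>T</u>____" ++ "________")))
      (2*j+2) (PySem.List.pyGetD (PySem.List.pySetD out (2*j+1) (PySem.List.pyGetD out (2*j+1) "" ++ ("___<u>T</u>____" ++ "________"))) (2*j+2) "" ++ ("_______________" ++ "___T____"))
  else
    PySem.List.pySetD
      (PySem.List.pySetD out (2*j+1) (PySem.List.pyGetD out (2*j+1) "" ++ ("_______________" ++ "________")))
      (2*j+2) (PySem.List.pyGetD (PySem.List.pySetD out (2*j+1) (PySem.List.pyGetD out (2*j+1) "" ++ ("_______________" ++ "________"))) (2*j+2) "" ++ ("_______________" ++ "________"))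

-- outer loop body of A: extend input, extend row 0, then run the j-loop
def aOuter (n : Int) (st : String × List String) (i : Int) : String × List String :=
  (st.1 ++ ("<p><u>T</u></p>" ++ "<p>T</p>"),
   (PySem.List.pyRange 0 n 1).foldl (aInner i)
     (PySem.List.pySetD st.2 0 (PySem.List.pyGetD st.2 0 "" ++ ("_______________" ++ "________"))))

def text_input_question_generate (n : Int) (m : Int) : List String × List (List String) :=
  let output0 := (PySem.List.pyRange 0 (2*n) 1).foldl (fun out _ => out ++ ["________"]) ["___T____"]
  let st := (PySem.List.pyRange 0 n 1).foldl (aOuter n) ("<p>T</p>", output0)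
  ([st.1, PySem.Str.slice st.1 (some 0) (some (PySem.Str.len st.1 - 8))],
   [st.2, PySem.List.slice (st.2.map fun el => PySem.Str.slice el none (some (PySem.Str.len el - 8))) none (some ((st.2.length : Int) - 1))])

-- ===== PORT B =====
-- exact hand port of Python's  s * k  on strings (concatenation of k copies; k ≤ 0 gives "")
def pvStrMul (s : String) (k : Int) : String := (List.replicate k.toNat s).foldl (· ++ ·) ""

def text_input_question_generate_alt (n : Int) (m : Int) : List String × List (List String) :=
  let norm := "_______________" ++ "________"
  let input := "<p>T</p>" ++ pvStrMul ("<p><u>T</u></p>" ++ "<p>T</p>") n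
  let output := (PySem.List.pyRange 0 n 1).foldl
    (fun out j =>
      (out ++ ["________" ++ pvStrMul norm j ++ "___<u>T</u>____" ++ "________" ++ pvStrMul norm (n - 1 - j)])
        ++ ["________" ++ pvStrMul norm j ++ "_______________" ++ "___T____" ++ pvStrMul norm (n - 1 - j)])
    ["___T____" ++ pvStrMul norm n]
  ([input, PySem.Str.slice input none (some (-8))],
   [output, PySem.List.slice (output.map fun el => PySem.Str.slice el none (some (-8))) none (some (-1))])

-- ===== PRECONDITION & SPEC =====
def Spec_text_input_question_generate (n : Int) (m : Int) (out : List String × List (List String)) : Prop := out = text_input_question_generate_alt n m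
instance (n : Int) (m : Int) (out : List String × List (List String)) : Decidable (Spec_text_input_question_generate n m out) := by unfold Spec_text_input_question_generate; infer_instance

-- ===== CLAIM (what is proved, stated in full; the proofs are below) =====
def Claim_equal_text_input_question_generate : Prop := ∀ (n : Int) (m : Int), Dom_text_input_question_generate n m → Spec_text_input_question_generate n m (text_input_question_generate n m)

-- ===== LEMMAS AND PROOFS =====

def nrmS : String := "_______________" ++ "________"
def blkS : String := "<p><u>T</u></p>" ++ "<p>T</p>"
def sp1S : String := "___<u>T</u>____" ++ "________"
def sp2S : String := "_______________" ++ "___T____"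

def srepS (s : String) : Nat → String
  | 0 => ""
  | k+1 => srepS s k ++ s

-- row 2j+1 (sp = sp1S) / 2j+2 (sp = sp2S) after k outer iterations
def rowA (sp : String) (k j : Nat) : String :=
  "________" ++ (if j < k then srepS nrmS j ++ sp ++ srepS nrmS (k-1-j) else srepS nrmS k)

-- the whole output list after k outer iterations, as a function of the position p
def cell (k p : Nat) : String :=
  if p = 0 then "___T____" ++ srepS nrmS k
  else if (p-1) % 2 = 0 then rowA sp1S k ((p-1)/2) else rowA sp2S k ((p-1)/2)

-- state inside outer iteration k after the inner loop has handled j = 0 .. t-1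
def cellIn (k t p : Nat) : String :=
  if p = 0 then cell (k+1) 0
  else if (p-1)/2 < t then cell (k+1) p else cell k p

lemma pvStrMul_natCast (s : String) (k : Nat) : pvStrMul s (k : Int) = srepS s k := by
  induction k with
  | zero => simp [pvStrMul, srepS]
  | succ k ih =>
      simp only [pvStrMul, Int.toNat_natCast] at ih ⊢
      rw [List.replicate_succ', List.foldl_append]
      rw [ih]; rfl

lemma pvStrMul_nonpos (s : String) {n : Int} (h : n ≤ 0) : pvStrMul s n = "" := by
  simp [pvStrMul, Int.toNat_of_nonpos h]

lemma rowA_append_self (sp : String) (k : Nat) : rowA sp k k ++ sp = rowA sp (k+1) k := by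
  have h0 : k + 1 - 1 - k = 0 := by omega
  rw [show k+1-1-k = 0 from h0] at *
  simp [rowA, srepS, String.append_assoc]

lemma rowA_append_norm_lt (sp : String) {k j : Nat} (h : j < k) :
    rowA sp k j ++ nrmS = rowA sp (k+1) j := by
  have h1 : k + 1 - 1 - j = (k - 1 - j) + 1 := by omega
  simp only [rowA, if_pos h, if_pos (Nat.lt_succ_of_lt h), h1, srepS, String.append_assoc]

lemma rowA_append_norm_ge (sp : String) {k j : Nat} (h : k < j) :
    rowA sp k j ++ nrmS = rowA sp (k+1) j := by
  have h1 : ¬ j < k := by omega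
  have h2 : ¬ j < k + 1 := by omega
  simp only [rowA, if_neg h1, if_neg h2, srepS, String.append_assoc]

lemma cell_zero_step (k : Nat) : cell k 0 ++ nrmS = cell (k+1) 0 := by
  simp [cell, srepS, String.append_assoc]

lemma cell_len8 (k p : Nat) : 8 ≤ (cell k p).toList.length := by
  unfold cell rowA
  split_ifs <;> simp [String.toList_append]

lemma strTrim8 (s : String) (h : 8 ≤ s.toList.length) :
    PySem.Str.slice s none (some (PySem.Str.len s - 8)) = PySem.Str.slice s none (some (-8)) := by
  unfold PySem.Str.slice
  congr 1
  simp only [PySem.Chars.slice_eq_listSlice, PySem.Str.len_eq]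
  rw [PySem.List.slice_to _ (by omega : (0:Int) ≤ (s.toList.length : Int) - 8)]
  rw [show ((-8 : Int)) = -((8:Nat):Int) by norm_num]
  rw [PySem.List.slice_to_neg_natCast _ 8 (by omega)]
  congr 1
  omega

lemma strTrim8' (s : String) (h : 8 ≤ s.toList.length) :
    PySem.Str.slice s (some 0) (some (PySem.Str.len s - 8)) = PySem.Str.slice s none (some (-8)) := by
  rw [← strTrim8 s h]
  unfold PySem.Str.slice
  congr 1

lemma flatMap_const_singleton {α β : Type} (c : β) (l : List α) :
    l.flatMap (fun _ => [c]) = List.replicate l.length c := by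
  induction l with
  | nil => simp
  | cons x l ih => simp [ih, List.replicate_succ]

lemma aInit (N : Nat) :
    (PySem.List.pyRange 0 (2*(N:Int)) 1).foldl (fun out _ => out ++ ["________"]) ["___T____"]
      = (List.range (2*N+1)).map (cell 0) := by
  rw [PySem.List.foldl_append_eq_flatMap (fun _ => (["________"] : List String)),
      flatMap_const_singleton]
  have hl : (PySem.List.pyRange 0 (2*(N:Int)) 1).length = 2*N := by
    rw [PySem.List.length_pyRange_one]; omega
  rw [hl]
  apply List.ext_getElem
  · simp
  · intro q h1 h2
    simp only [List.getElem_map, List.getElem_range]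
    match q with
    | 0 => simp [cell, srepS]
    | (q+1) =>
        have hv : (["___T____"] ++ List.replicate (2*N) "________")[q+1] = "________" := by
          simp only [List.singleton_append, List.getElem_cons_succ]
          exact List.getElem_replicate _
        rw [hv]
        have hq0 : ¬ (q+1 = 0) := by omega
        simp only [cell, if_neg hq0]
        split_ifs <;> simp [rowA, srepS]


lemma rowA_step (sp : String) (k j : Nat) :
    rowA sp k j ++ (if j = k then sp else nrmS) = rowA sp (k+1) j := by
  rcases lt_trichotomy j k with h | h | h
  · rw [if_neg (by omega)]; exact rowA_append_norm_lt sp h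
  · subst h; rw [if_pos rfl]; exact rowA_append_self sp j
  · rw [if_neg (by omega)]; exact rowA_append_norm_ge sp h

lemma cell_odd (k t : Nat) : cell k (2*t+1) = rowA sp1S k t := by
  simp [cell]

lemma cell_even (k t : Nat) : cell k (2*t+2) = rowA sp2S k t := by
  have h2' : (2*t+1)/2 = t := by omega
  simp [cell, h2']

lemma cellIn_ge (k t p : Nat) (hp : ¬ p = 0) (hge : ¬ (p-1)/2 < t) : cellIn k t p = cell k p := by
  simp [cellIn, hp, hge]

lemma cellIn_lt (k t p : Nat) (hp : ¬ p = 0) (hlt : (p-1)/2 < t) : cellIn k t p = cell (k+1) p := by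
  simp [cellIn, hp, hlt]

lemma pySetGet_map_range {M : Nat} (f : Nat → String) (idx : Nat) (hidx : idx < M) (c : String) :
    PySem.List.pySetD ((List.range M).map f) ((idx : Nat) : Int)
      (PySem.List.pyGetD ((List.range M).map f) ((idx : Nat) : Int) "" ++ c)
      = (List.range M).map (fun p => if p = idx then f p ++ c else f p) := by
  rw [PySem.List.pySetD_of_nonneg _ _ (by positivity), PySem.List.pyGetD_of_nonneg _ _ (by positivity)]
  simp only [Int.toNat_natCast]
  rw [PySem.List.getD_map_range f M idx _ hidx]
  apply List.ext_getElem
  · simp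
  · intro q h1 h2
    simp only [List.getElem_set, List.getElem_map, List.getElem_range]
    by_cases hq : idx = q
    · subst hq; simp
    · rw [if_neg hq, if_neg (by omega)]

lemma cellIn_update (N k t : Nat) (p : Nat) (hp : p < 2*N+1) :
    (if p = 2*t+1 then cellIn k t p ++ (if t = k then sp1S else nrmS)
     else if p = 2*t+2 then cellIn k t p ++ (if t = k then sp2S else nrmS)
     else cellIn k t p) = cellIn k (t+1) p := by
  by_cases h1 : p = 2*t+1
  · subst h1
    rw [if_pos rfl, cellIn_ge k t _ (by omega) (by omega), cell_odd,
        cellIn_lt k (t+1) _ (by omega) (by omega), cell_odd]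
    exact rowA_step sp1S k t
  · by_cases h2 : p = 2*t+2
    · subst h2
      rw [if_neg h1, if_pos rfl, cellIn_ge k t _ (by omega) (by omega), cell_even,
          cellIn_lt k (t+1) _ (by omega) (by omega), cell_even]
      exact rowA_step sp2S k t
    · rw [if_neg h1, if_neg h2]
      by_cases hp0 : p = 0
      · simp [cellIn, hp0]
      · have hne : ¬ (p-1)/2 = t := by omega
        by_cases hlt : (p-1)/2 < t
        · rw [cellIn_lt k t p hp0 hlt, cellIn_lt k (t+1) p hp0 (by omega)]
        · rw [cellIn_ge k t p hp0 hlt, cellIn_ge k (t+1) p hp0 (by omega)]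

lemma aInner_step (N k t : Nat) (ht : t < N) :
    aInner (k:Int) ((List.range (2*N+1)).map (cellIn k t)) (t:Int)
      = (List.range (2*N+1)).map (cellIn k (t+1)) := by
  have hc1 : (2*(t:Int)+1) = ((2*t+1 : Nat) : Int) := by push_cast; ring
  have hc2 : (2*(t:Int)+2) = ((2*t+2 : Nat) : Int) := by push_cast; ring
  have hlt1 : 2*t+1 < 2*N+1 := by omega
  have hlt2 : 2*t+2 < 2*N+1 := by omega
  have key : ∀ (c1 c2 : String),
      PySem.List.pySetD
        (PySem.List.pySetD ((List.range (2*N+1)).map (cellIn k t)) (2*(t:Int)+1)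
          (PySem.List.pyGetD ((List.range (2*N+1)).map (cellIn k t)) (2*(t:Int)+1) "" ++ c1))
        (2*(t:Int)+2)
        (PySem.List.pyGetD (PySem.List.pySetD ((List.range (2*N+1)).map (cellIn k t)) (2*(t:Int)+1)
          (PySem.List.pyGetD ((List.range (2*N+1)).map (cellIn k t)) (2*(t:Int)+1) "" ++ c1)) (2*(t:Int)+2) "" ++ c2)
        = (List.range (2*N+1)).map (fun p =>
            if p = 2*t+1 then cellIn k t p ++ c1
            else if p = 2*t+2 then cellIn k t p ++ c2
            else cellIn k t p) := by
    intro c1 c2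
    rw [hc1, hc2, pySetGet_map_range (cellIn k t) (2*t+1) hlt1 c1,
        pySetGet_map_range _ (2*t+2) hlt2 c2]
    apply List.map_congr_left
    intro p _
    by_cases h2 : p = 2*t+2
    · have h1 : ¬ p = 2*t+1 := by omega
      rw [if_neg h1, if_neg h1, if_pos h2]
    · by_cases h1 : p = 2*t+1
      · simp [h1]
      · simp [h1, h2]
  unfold aInner
  by_cases htk : t = k
  · have hb : ((t:Int) == (k:Int)) = true := by simp [htk]
    rw [hb]
    simp only [if_true]
    rw [key ("___<u>T</u>____" ++ "________") ("_______________" ++ "___T____")]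
    apply List.map_congr_left
    intro p hpm
    have hp : p < 2*N+1 := List.mem_range.mp hpm
    have hh := cellIn_update N k t p hp
    rw [if_pos htk, if_pos htk] at hh
    exact hh
  · have hb : ((t:Int) == (k:Int)) = false := by
      simp only [beq_eq_false_iff_ne, ne_eq, Int.natCast_inj]
      exact htk
    rw [hb]
    simp only [Bool.false_eq_true, if_false]
    rw [key ("_______________" ++ "________") ("_______________" ++ "________")]
    apply List.map_congr_left
    intro p hpm
    have hp : p < 2*N+1 := List.mem_range.mp hpm
    have hh := cellIn_update N k t p hp
    rw [if_neg htk, if_neg htk] at hh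
    exact hh

lemma aInner_fold (N k : Nat) : ∀ t, t ≤ N →
    (PySem.List.pyRange 0 (t:Int) 1).foldl (aInner (k:Int)) ((List.range (2*N+1)).map (cellIn k 0))
      = (List.range (2*N+1)).map (cellIn k t) := by
  intro t
  induction t with
  | zero => intro _; simp only [Nat.cast_zero]; rw [PySem.List.pyRange_one_eq_nil (le_refl 0)]; rfl
  | succ t ih =>
      intro h
      have h1 : ((t+1 : Nat) : Int) = (t : Int) + 1 := by push_cast; ring
      rw [h1, PySem.List.pyRange_one_succ_right (by positivity), List.foldl_append,
          ih (by omega)]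
      simpa using aInner_step N k t (by omega)

lemma aOuter_step (N k : Nat) (hk : k < N) (s : String) :
    aOuter (N:Int) (s, (List.range (2*N+1)).map (cell k)) (k:Int)
      = (s ++ blkS, (List.range (2*N+1)).map (cell (k+1))) := by
  unfold aOuter
  have h0 : PySem.List.pySetD ((List.range (2*N+1)).map (cell k)) 0
      (PySem.List.pyGetD ((List.range (2*N+1)).map (cell k)) 0 "" ++ ("_______________" ++ "________"))
      = (List.range (2*N+1)).map (cellIn k 0) := by
    have hps := pySetGet_map_range (M := 2*N+1) (cell k) 0 (by omega) ("_______________" ++ "________")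
    simp only [Nat.cast_zero] at hps
    rw [hps]
    apply List.map_congr_left
    intro p _
    by_cases hp0 : p = 0
    · subst hp0
      rw [if_pos rfl]
      simpa [cellIn] using cell_zero_step k
    · rw [if_neg hp0]
      simp [cellIn, hp0]
  rw [h0, aInner_fold N k N (le_refl N)]
  refine Prod.ext rfl ?_
  show (List.range (2*N+1)).map (cellIn k N) = (List.range (2*N+1)).map (cell (k+1))
  apply List.map_congr_left
  intro p hpm
  have hp : p < 2*N+1 := List.mem_range.mp hpm
  by_cases hp0 : p = 0
  · simp [cellIn, cell, hp0]
  · exact cellIn_lt k N p hp0 (by omega)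

lemma aOuter_fold (N : Nat) : ∀ k, k ≤ N →
    (PySem.List.pyRange 0 (k:Int) 1).foldl (aOuter (N:Int)) ("<p>T</p>", (List.range (2*N+1)).map (cell 0))
      = ("<p>T</p>" ++ srepS blkS k, (List.range (2*N+1)).map (cell k)) := by
  intro k
  induction k with
  | zero =>
      intro _
      simp only [Nat.cast_zero]
      rw [PySem.List.pyRange_one_eq_nil (le_refl 0)]
      simp [srepS]
  | succ k ih =>
      intro h
      have h1 : ((k+1 : Nat) : Int) = (k : Int) + 1 := by push_cast; ring
      rw [h1, PySem.List.pyRange_one_succ_right (by positivity), List.foldl_append,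
          ih (by omega), List.foldl_cons, List.foldl_nil, aOuter_step N k (by omega)]
      simp [srepS, String.append_assoc, blkS]

lemma flatMap_pairs (f g : Nat → String) (Nn : Nat) :
    (List.range Nn).flatMap (fun k => [f k, g k])
      = (List.range (2*Nn)).map (fun q => if q % 2 = 0 then f (q/2) else g (q/2)) := by
  induction Nn with
  | zero => simp
  | succ Nn ih =>
      have h2 : 2*(Nn+1) = (2*Nn + 1) + 1 := by omega
      rw [List.range_succ, List.flatMap_append, ih, h2, List.range_succ, List.range_succ]
      have e1 : (2*Nn) % 2 = 0 ∧ (2*Nn)/2 = Nn := by omega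
      have e2 : ¬ (2*Nn+1) % 2 = 0 := by omega
      have e3 : (2*Nn+1)/2 = Nn := by omega
      simp [e1.1, e1.2, e3]

lemma foldl_append2 {α β : Type} (g h : α → List β) (l : List α) (acc : List β) :
    l.foldl (fun acc x => (acc ++ g x) ++ h x) acc = acc ++ l.flatMap (fun x => g x ++ h x) := by
  induction l generalizing acc with
  | nil => simp
  | cons x l ih =>
      rw [List.foldl_cons, ih, List.flatMap_cons]
      simp [List.append_assoc]

lemma bRow1 (N j : Nat) (hj : j < N) :
    "________" ++ pvStrMul ("_______________" ++ "________") (j : Int) ++ "___<u>T</u>____" ++ "________"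
        ++ pvStrMul ("_______________" ++ "________") ((N:Int) - 1 - (j : Int))
      = rowA sp1S N j := by
  have e2 : (N:Int) - 1 - (j:Int) = ((N - 1 - j : Nat) : Int) := by omega
  rw [(rfl : ("_______________" ++ "________" : String) = nrmS), e2,
      pvStrMul_natCast, pvStrMul_natCast]
  rw [rowA, if_pos hj]
  simp [sp1S, nrmS, String.append_assoc]

lemma bRow2 (N j : Nat) (hj : j < N) :
    "________" ++ pvStrMul ("_______________" ++ "________") (j : Int) ++ "_______________" ++ "___T____"
        ++ pvStrMul ("_______________" ++ "________") ((N:Int) - 1 - (j : Int))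
      = rowA sp2S N j := by
  have e2 : (N:Int) - 1 - (j:Int) = ((N - 1 - j : Nat) : Int) := by omega
  rw [(rfl : ("_______________" ++ "________" : String) = nrmS), e2,
      pvStrMul_natCast, pvStrMul_natCast]
  rw [rowA, if_pos hj]
  simp [sp2S, nrmS, String.append_assoc]

lemma bOut (N : Nat) :
    (PySem.List.pyRange 0 ((N:Int)) 1).foldl
      (fun out j =>
        (out ++ ["________" ++ pvStrMul ("_______________" ++ "________") j ++ "___<u>T</u>____" ++ "________"
                  ++ pvStrMul ("_______________" ++ "________") ((N:Int) - 1 - j)])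
          ++ ["________" ++ pvStrMul ("_______________" ++ "________") j ++ "_______________" ++ "___T____"
                  ++ pvStrMul ("_______________" ++ "________") ((N:Int) - 1 - j)])
      ["___T____" ++ pvStrMul ("_______________" ++ "________") (N:Int)]
      = (List.range (2*N+1)).map (cell N) := by
  rw [foldl_append2, PySem.List.pyRange_one]
  simp only [Int.sub_zero, Int.toNat_natCast, zero_add, List.flatMap_map, List.singleton_append]
  rw [flatMap_pairs
      (fun q : Nat => "________" ++ pvStrMul ("_______________" ++ "________") (q : Int) ++ "___<u>T</u>____" ++ "________"
          ++ pvStrMul ("_______________" ++ "________") ((N:Int) - 1 - (q : Int)))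
      (fun q : Nat => "________" ++ pvStrMul ("_______________" ++ "________") (q : Int) ++ "_______________" ++ "___T____"
          ++ pvStrMul ("_______________" ++ "________") ((N:Int) - 1 - (q : Int))) N]
  apply List.ext_getElem
  · simp
  · intro q h1 h2
    simp only [List.getElem_map, List.getElem_range]
    match q with
    | 0 =>
        simp only [List.getElem_cons_zero]
        rw [(rfl : ("_______________" ++ "________" : String) = nrmS), pvStrMul_natCast]
        simp [cell, nrmS]
    | (q+1) =>
        have hq2 : q < 2*N := by simpa using h1
        simp only [List.getElem_cons_succ, List.getElem_map, List.getElem_range]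
        by_cases he : q % 2 = 0
        · rw [if_pos he, bRow1 N (q/2) (by omega),
              show q+1 = 2*(q/2)+1 by omega, cell_odd]
        · rw [if_neg he, bRow2 N (q/2) (by omega),
              show q+1 = 2*(q/2)+2 by omega, cell_even]
lemma main_nonneg (N : Nat) (m : Int) :
    text_input_question_generate (N:Int) m = text_input_question_generate_alt (N:Int) m := by
  unfold text_input_question_generate text_input_question_generate_alt
  simp only []
  rw [aInit N, aOuter_fold N N (le_refl N), bOut N]
  have hPQ : pvStrMul ("<p><u>T</u></p>" ++ "<p>T</p>") (N:Int) = srepS blkS N := by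
    rw [pvStrMul_natCast]; rfl
  rw [hPQ]
  have h8 : 8 ≤ ("<p>T</p>" ++ srepS blkS N).toList.length := by
    rw [String.toList_append, List.length_append]
    have : ("<p>T</p>" : String).toList.length = 8 := by decide
    omega
  rw [strTrim8' _ h8]
  have hOlen : (List.map (cell N) (List.range (2*N+1))).length = 2*N+1 := by simp
  rw [hOlen]
  have hcast : ((2*N+1 : Nat) : Int) - 1 = ((2*N : Nat) : Int) := by push_cast; ring
  rw [hcast, PySem.List.slice_to _ (by positivity), Int.toNat_natCast,
      PySem.List.slice_to_neg_one]
  have hmap : (List.map (cell N) (List.range (2*N+1))).map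
        (fun el => PySem.Str.slice el none (some (PySem.Str.len el - 8)))
      = (List.map (cell N) (List.range (2*N+1))).map
        (fun el => PySem.Str.slice el none (some (-8))) := by
    apply List.map_congr_left
    intro el hel
    obtain ⟨p, -, rfl⟩ := List.mem_map.mp hel
    exact strTrim8 _ (cell_len8 N p)
  rw [hmap, List.dropLast_eq_take]
  have hlen2 : ((List.map (cell N) (List.range (2*N+1))).map
      (fun el => PySem.Str.slice el none (some (-8)))).length - 1 = 2*N := by simp
  rw [hlen2]

lemma main_neg (n : Int) (hn : n < 0) (m : Int) :
    text_input_question_generate n m = text_input_question_generate_alt n m := by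
  unfold text_input_question_generate text_input_question_generate_alt
  simp only []
  rw [PySem.List.pyRange_one_eq_nil (show n ≤ (0:Int) by omega),
      PySem.List.pyRange_one_eq_nil (show 2*n ≤ (0:Int) by omega)]
  simp only [List.foldl_nil, pvStrMul_nonpos _ (show n ≤ (0:Int) by omega)]
  decide

-- ===== VERDICT (by name: the statement is the Claim_ definition above) =====
theorem text_input_question_generate_spec : Claim_equal_text_input_question_generate := by
  intro n m _
  unfold Spec_text_input_question_generate
  by_cases hn : 0 ≤ n
  · have : n = (n.toNat : Int) := (Int.toNat_of_nonneg hn).symm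
    rw [this]; exact main_nonneg n.toNat m
  · exact main_neg n (by omega) m
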